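-- pv_equiv track=rewrite | github.com/Kowalskiexe/algo | Cloudflight Coding Contest/2024_2/5.py | first_free
-- ===== SOURCE A (Python) =====
-- def has_neighbor(m: list[list[int]], y: int, x: int) -> bool:
--     for c in range(max(0, x - 1), min(x + 2, len(m[0]))):
--         for r in range(max(0, y - 1), min(y + 2, len(m))):
--             if m[r][c] != 0:
--                 return True
--     return False
--
-- def first_free(m: list[list[int]], orientation: int) -> tuple[int, int]:
--     for y, r in enumerate(m):
--         for x, _ in enumerate(r):
--             if has_neighbor(m, y, x):
--                 continue
--             if orientation == 0 and (y + 1 >= len(m) or has_neighbor(m, y + 1, x)):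
--                 continue
--             if orientation == 1 and (x + 1 >= len(m[0]) or has_neighbor(m, y, x + 1)):
--                 continue
--             return y, x
--     return -1, -1
-- ===== SOURCE B (Python) =====
-- def first_free(m, orientation):
--     h = len(m)
--     w = len(m[0]) if m else 0
--     # per-row prefix counts of nonzero entries: pref[y][b] = #{c < b : m[y][c] != 0}
--     pref = []
--     for row in m:
--         p = [0]
--         s = 0
--         for x in range(w):
--             s += 1 if row[x] != 0 else 0
--             p.append(s)
--         pref.append(p)
--
--     def free(y, x):
--         # window columns clamped to the tabulated range [0, w]
--         lo, hi = min(max(0, x - 1), w), min(x + 2, w)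
--         s = 0
--         for r in range(max(0, y - 1), min(y + 2, h)):
--             s += pref[r][hi] - pref[r][lo]
--         return s == 0
--
--     for y, row in enumerate(m):
--         for x in range(len(row)):
--             if not free(y, x):
--                 continue
--             if orientation == 0 and (y + 1 >= h or not free(y + 1, x)):
--                 continue
--             if orientation == 1 and (x + 1 >= w or not free(y, x + 1)):
--                 continue
--             return y, x
--     return -1, -1
-- ===== Notes on version B (the rewrite author's own statement) =====
-- stated objective: alternative
-- what changed: B precomputes per-row prefix counts of nonzero cells once, so each 3x3-window emptiness test becomes prefix-sum differences over at most three rows instead of re-scanning the window column by column with has_neighbor.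
-- outside the precondition, e.g. on first_free([[5, 0], [0]], 0): A returns (-1, -1), B raises IndexError
import Mathlib
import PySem

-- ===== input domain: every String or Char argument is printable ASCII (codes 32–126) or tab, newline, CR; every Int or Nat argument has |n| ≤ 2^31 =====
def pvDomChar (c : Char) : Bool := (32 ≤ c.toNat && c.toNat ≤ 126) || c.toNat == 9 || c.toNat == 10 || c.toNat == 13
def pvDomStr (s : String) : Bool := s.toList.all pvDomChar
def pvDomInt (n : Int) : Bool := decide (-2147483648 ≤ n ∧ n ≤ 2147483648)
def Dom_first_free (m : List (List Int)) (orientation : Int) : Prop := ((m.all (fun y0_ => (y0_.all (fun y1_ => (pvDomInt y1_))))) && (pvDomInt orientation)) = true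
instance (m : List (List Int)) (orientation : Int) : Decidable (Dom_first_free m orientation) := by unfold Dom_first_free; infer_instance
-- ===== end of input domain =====

-- B replaces A's per-cell 3x3 window rescans (has_neighbor) by per-row prefix counts of
-- nonzero cells computed once, answering each window-emptiness query by prefix differences
-- over at most three rows (objective: alternative algorithm, similar cost).


-- ===== PORT A =====
-- has_neighbor: scans columns max(0,x-1)..min(x+2,len(m[0])), rows max(0,y-1)..min(y+2,len(m)),
-- returning True at the first nonzero cell (early-return loop = List.any).
def hasNeighbor (m : List (List Int)) (y x : Int) : Bool :=
  (PySem.List.pyRange (max 0 (x - 1)) (min (x + 2) ((m.headD []).length : Int)) 1).any (fun c =>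
    (PySem.List.pyRange (max 0 (y - 1)) (min (y + 2) (m.length : Int)) 1).any (fun r =>
      PySem.List.pyGetD (PySem.List.pyGetD m r []) c 0 != 0))

def first_free (m : List (List Int)) (orientation : Int) : Int × Int :=
  ((PySem.List.enumerate m).findSome? (fun yr =>
    (PySem.List.enumerate yr.2).findSome? (fun xv =>
      if hasNeighbor m yr.1 xv.1 then none
      else if orientation = 0 ∧ (yr.1 + 1 ≥ (m.length : Int) ∨ hasNeighbor m (yr.1 + 1) xv.1) then none
      else if orientation = 1 ∧ (xv.1 + 1 ≥ ((m.headD []).length : Int) ∨ hasNeighbor m yr.1 (xv.1 + 1)) then none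
      else some (yr.1, xv.1)))).getD (-1, -1)

-- ===== PORT B =====
-- one prefix row:  p = [0]; s = 0; for x in range(w): s += 1 if row[x] != 0 else 0; p.append(s)
def rowPref (w : Int) (row : List Int) : List Int :=
  ((PySem.List.pyRange 0 w 1).foldl (fun (st : Int × List Int) x =>
      let s := st.1 + (if PySem.List.pyGetD row x 0 ≠ 0 then 1 else 0)
      (s, st.2 ++ [s])) (0, [0])).2

-- free(y, x): window nonzero count via prefix differences over rows max(0,y-1)..min(y+2,h)
def freeB (pref : List (List Int)) (h w : Int) (y x : Int) : Bool :=
  let lo := min (max 0 (x - 1)) w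
  let hi := min (x + 2) w
  decide (((PySem.List.pyRange (max 0 (y - 1)) (min (y + 2) h) 1).foldl
    (fun s r => s + (PySem.List.pyGetD (PySem.List.pyGetD pref r []) hi 0
                     - PySem.List.pyGetD (PySem.List.pyGetD pref r []) lo 0)) 0) = 0)

def first_free_alt (m : List (List Int)) (orientation : Int) : Int × Int :=
  let h : Int := m.length
  let w : Int := ((m.headD []).length : Int)
  let pref := m.map (rowPref w)
  ((PySem.List.enumerate m).findSome? (fun yr =>
    (PySem.List.pyRange 0 (yr.2.length : Int) 1).findSome? (fun x =>
      if ¬ freeB pref h w yr.1 x then none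
      else if orientation = 0 ∧ (yr.1 + 1 ≥ h ∨ ¬ freeB pref h w (yr.1 + 1) x) then none
      else if orientation = 1 ∧ (x + 1 ≥ w ∨ ¬ freeB pref h w yr.1 (x + 1)) then none
      else some (yr.1, x)))).getD (-1, -1)

-- ===== PRECONDITION & SPEC =====
-- Pre_ excludes grids in which some row is shorter than the first row: there A's window probe
-- m[r][c] can hit a missing cell (IndexError) or A returns only thanks to an early exit before
-- the missing cell, while B's prefix table built to the first row's width raises IndexError.
def Pre_first_free (m : List (List Int)) (orientation : Int) : Prop :=
  ∀ r ∈ m, (m.headD []).length ≤ r.length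
instance (m : List (List Int)) (orientation : Int) : Decidable (Pre_first_free m orientation) := by
  unfold Pre_first_free; infer_instance

def pvWitness_first_free : List (List Int) × Int := ([[0, 0], [0, 1]], 0)

def Spec_first_free (m : List (List Int)) (orientation : Int) (out : Int × Int) : Prop := out = first_free_alt m orientation
instance (m : List (List Int)) (orientation : Int) (out : Int × Int) : Decidable (Spec_first_free m orientation out) := by unfold Spec_first_free; infer_instance

-- ===== CLAIM (what is proved, stated in full; the proofs are below) =====
def Claim_equal_first_free : Prop := ∀ (m : List (List Int)) (orientation : Int), Dom_first_free m orientation → Pre_first_free m orientation → Spec_first_free m orientation (first_free m orientation)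

-- ===== LEMMAS AND PROOFS =====

-- count of nonzero entries among the first b cells of a row
def cntNZ (row : List Int) (b : Nat) : Int := ((row.take b).countP (fun v => v != 0) : Int)

lemma findSome?_congr {α β : Type} {l : List α} {f g : α → Option β}
    (h : ∀ a ∈ l, f a = g a) : l.findSome? f = l.findSome? g := by
  induction l with
  | nil => rfl
  | cons a l ih =>
    simp only [List.findSome?_cons, h a (List.mem_cons_self), ih (fun b hb => h b (List.mem_cons_of_mem a hb))]

lemma rowPref_foldl (row : List Int) (w : Nat) (hw : w ≤ row.length) :
    (PySem.List.pyRange 0 (w : Int) 1).foldl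
      (fun (st : Int × List Int) x =>
        let s := st.1 + (if PySem.List.pyGetD row x 0 ≠ 0 then 1 else 0)
        (s, st.2 ++ [s])) (0, [0])
    = (cntNZ row w, (List.range (w + 1)).map (fun b => cntNZ row b)) := by
  induction w with
  | zero =>
    simp only [Nat.cast_zero]
    rw [PySem.List.pyRange_one_eq_nil le_rfl]
    simp [cntNZ]
  | succ w ih =>
    have hw' : w ≤ row.length := by omega
    have hcast : ((w + 1 : Nat) : Int) = (w : Int) + 1 := by push_cast; ring
    rw [hcast, PySem.List.pyRange_one_succ_right (by positivity), List.foldl_append, ih hw']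
    have hget : PySem.List.pyGetD row (w : Int) 0 = row[w] := by
      rw [PySem.List.pyGetD_eq_getElem row 0 (by positivity) (by exact_mod_cast hw)]; simp; rfl
    have hcnt : cntNZ row (w + 1) = cntNZ row w + (if row[w] ≠ 0 then 1 else 0) := by
      unfold cntNZ
      rw [List.take_add_one, List.countP_append]
      have : row[w]? = some row[w] := List.getElem?_eq_getElem hw
      rw [this]
      by_cases h : row[w] = 0 <;> simp [h]
    simp only [List.foldl_cons, List.foldl_nil, hget]
    have hr : List.range (w + 1 + 1) = List.range w ++ [w, w + 1] := by
      rw [List.range_succ, List.range_succ]; simp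
    rw [hr, List.map_append]
    by_cases h : row[w] = 0 <;> simp [h, hcnt, List.range_succ]

lemma rowPref_eq (row : List Int) (w : Nat) (hw : w ≤ row.length) :
    rowPref (w : Int) row = (List.range (w + 1)).map (fun b => cntNZ row b) := by
  unfold rowPref
  rw [rowPref_foldl row w hw]

lemma cnt_sub (row : List Int) (a b : Nat) (hab : a ≤ b) :
    cntNZ row b - cntNZ row a = (((row.drop a).take (b - a)).countP (fun v => v != 0) : Int) := by
  unfold cntNZ
  have h := List.take_add (l := row) (i := a) (j := b - a)
  rw [Nat.add_sub_cancel' hab] at h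
  rw [h, List.countP_append]
  push_cast; ring

lemma cnt_sub_nonneg (row : List Int) (a b : Nat) (hab : a ≤ b) :
    0 ≤ cntNZ row b - cntNZ row a := by
  rw [cnt_sub row a b hab]; positivity

lemma seg_zero_iff (row : List Int) (a b : Nat) (hab : a ≤ b) (hb : b ≤ row.length) :
    cntNZ row b - cntNZ row a = 0 ↔
      ∀ c : Int, (a : Int) ≤ c → c < (b : Int) → PySem.List.pyGetD row c 0 = 0 := by
  rw [cnt_sub row a b hab]
  rw [show ((((row.drop a).take (b - a)).countP (fun v => v != 0) : Int) = 0) ↔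
      (((row.drop a).take (b - a)).countP (fun v => v != 0) = 0) from by exact_mod_cast Iff.rfl]
  rw [List.countP_eq_zero]
  constructor
  · intro hall c hc1 hc2
    have h0 : 0 ≤ c := le_trans (by positivity) hc1
    have hlen : c < (row.length : Int) := lt_of_lt_of_le hc2 (by exact_mod_cast hb)
    rw [PySem.List.pyGetD_eq_getElem row 0 h0 hlen]
    set j := c.toNat - a with hj
    have hjc : c.toNat = a + j := by omega
    have hjlt : j < b - a := by omega
    have hjlen : j < ((row.drop a).take (b - a)).length := by
      simp [List.length_take, List.length_drop]; omega
    have hmem : row[c.toNat] ∈ (row.drop a).take (b - a) := by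
      have : ((row.drop a).take (b - a))[j] = row[c.toNat] := by
        rw [List.getElem_take, List.getElem_drop]
        exact getElem_congr rfl (by omega) _
      rw [← this]
      exact List.getElem_mem _
    have := hall _ hmem
    simpa using this
  · intro hall v hv
    obtain ⟨j, hjlt, hjv⟩ := List.mem_iff_getElem.mp hv
    have hjlen : j < b - a := by
      have := hjlt; simp [List.length_take, List.length_drop] at this; omega
    have hv' : v = row[a + j]'(by omega) := by
      rw [← hjv, List.getElem_take, List.getElem_drop]
    have := hall ((a + j : Nat) : Int) (by exact_mod_cast by omega) (by exact_mod_cast by omega)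
    rw [PySem.List.pyGetD_eq_getElem row 0 (by positivity) (by exact_mod_cast by omega)] at this
    simp only [Int.toNat_natCast] at this
    simp [hv', this]

lemma pref_entry (m : List (List Int)) (hpre : ∀ r ∈ m, (m.headD []).length ≤ r.length)
    (r : Int) (hr0 : 0 ≤ r) (hr1 : r < (m.length : Int)) (b : Nat) (hb : b ≤ (m.headD []).length) :
    PySem.List.pyGetD (PySem.List.pyGetD (m.map (rowPref ((m.headD []).length : Int))) r []) (b : Int) 0
      = cntNZ (PySem.List.pyGetD m r []) b := by
  rw [PySem.List.pyGetD_eq_getElem (m.map _) _ hr0 (by simpa using hr1)]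
  rw [List.getElem_map]
  rw [PySem.List.pyGetD_eq_getElem m _ hr0 hr1]
  have hrn : r.toNat < m.length := by omega
  have hlen : (m.headD []).length ≤ (m[r.toNat]).length := hpre _ (List.getElem_mem _)
  rw [rowPref_eq _ _ hlen, PySem.List.pyGetD_natCast,
      PySem.List.getD_map_range _ _ _ _ (by omega)]

lemma sum_eq_zero_iff_of_nonneg {α : Type} (l : List α) (f : α → Int)
    (h : ∀ x ∈ l, 0 ≤ f x) : (l.map f).sum = 0 ↔ ∀ x ∈ l, f x = 0 := by
  induction l with
  | nil => simp
  | cons a l ih =>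
    have ha := h a List.mem_cons_self
    have hl : ∀ x ∈ l, 0 ≤ f x := fun x hx => h x (List.mem_cons_of_mem a hx)
    have hrest : 0 ≤ (l.map f).sum :=
      List.sum_nonneg (by
        intro v hv
        obtain ⟨a', ha', rfl⟩ := List.mem_map.mp hv
        exact hl a' ha')
    simp only [List.map_cons, List.sum_cons, List.mem_cons]
    constructor
    · intro h0
      have h1 : f a = 0 ∧ (l.map f).sum = 0 := by omega
      rintro v (rfl | hv)
      · exact h1.1
      · exact (ih hl).mp h1.2 v hv
    · intro h0
      have : (l.map f).sum = 0 := (ih hl).mpr (fun v hv => h0 v (Or.inr hv))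
      have := h0 a (Or.inl rfl)
      omega

lemma freeB_eq_not_hasNeighbor (m : List (List Int))
    (hpre : ∀ r ∈ m, (m.headD []).length ≤ r.length) (y x : Int) (hx0 : 0 ≤ x) :
    freeB (m.map (rowPref ((m.headD []).length : Int))) (m.length : Int) ((m.headD []).length : Int) y x
      = ! hasNeighbor m y x := by
  unfold freeB hasNeighbor
  set w0 : Nat := (m.headD []).length with hw0
  set rows := PySem.List.pyRange (max 0 (y - 1)) (min (y + 2) (m.length : Int)) 1 with hrows
  have hrbounds : ∀ r ∈ rows, 0 ≤ r ∧ r < (m.length : Int) := by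
    intro r hr
    rw [hrows, PySem.List.mem_pyRange_one] at hr
    omega
  have hrowlen : ∀ r : Int, 0 ≤ r → r < (m.length : Int) →
      w0 ≤ (PySem.List.pyGetD m r []).length := by
    intro r h0 h1
    refine hpre _ (PySem.List.pyGetD_mem m [] ?_)
    unfold PySem.Raise.InRange
    constructor <;> omega
  dsimp only
  by_cases hxw : x ≤ (w0 : Int)
  · have hlo : min (max 0 (x - 1)) (w0 : Int) = max 0 (x - 1) := by omega
    rw [hlo]
    set x0 : Int := max 0 (x - 1) with hx0def
    set x1 : Int := min (x + 2) (w0 : Int) with hx1def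
    have hx01 : 0 ≤ x0 ∧ x0 ≤ x1 ∧ x1 ≤ (w0 : Int) := by omega
    set a : Nat := x0.toNat with hadef
    set b : Nat := x1.toNat with hbdef
    have hca : (a : Int) = x0 := by omega
    have hcb : (b : Int) = x1 := by omega
    have hab : a ≤ b := by omega
    have hterm : ∀ r ∈ rows,
        PySem.List.pyGetD (PySem.List.pyGetD (m.map (rowPref (w0 : Int))) r []) x1 0
          - PySem.List.pyGetD (PySem.List.pyGetD (m.map (rowPref (w0 : Int))) r []) x0 0
        = cntNZ (PySem.List.pyGetD m r []) b - cntNZ (PySem.List.pyGetD m r []) a := by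
      intro r hr
      obtain ⟨h0, h1⟩ := hrbounds r hr
      rw [← hca, ← hcb,
          pref_entry m hpre r h0 h1 b (by omega),
          pref_entry m hpre r h0 h1 a (by omega)]
    rw [PySem.List.foldl_add rows _ 0]
    have hsum : (rows.map (fun r =>
        PySem.List.pyGetD (PySem.List.pyGetD (m.map (rowPref (w0 : Int))) r []) x1 0
          - PySem.List.pyGetD (PySem.List.pyGetD (m.map (rowPref (w0 : Int))) r []) x0 0)).sum = 0
        ↔ ∀ r ∈ rows, ∀ c : Int, x0 ≤ c → c < x1 → PySem.List.pyGetD (PySem.List.pyGetD m r []) c 0 = 0 := by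
      rw [sum_eq_zero_iff_of_nonneg _ _ (by
        intro r hr
        rw [hterm r hr]
        exact cnt_sub_nonneg _ a b hab)]
      refine forall_congr' fun r => ?_
      by_cases hr : r ∈ rows
      · simp only [hr, forall_true_left, hterm r hr]
        obtain ⟨h0, h1⟩ := hrbounds r hr
        rw [seg_zero_iff _ a b hab (by have := hrowlen r h0 h1; omega), hca, hcb]
      · simp [hr]
    by_cases hn : (PySem.List.pyRange x0 x1 1).any (fun c => rows.any (fun r =>
        PySem.List.pyGetD (PySem.List.pyGetD m r []) c 0 != 0)) = true
    · simp only [hn, Bool.not_true, decide_eq_false_iff_not]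
      intro hzero
      rw [show (0 : Int) + _ = _ from zero_add _] at hzero
      have hall := hsum.mp hzero
      simp only [List.any_eq_true] at hn
      obtain ⟨c, hc, r, hr, hne⟩ := hn
      rw [PySem.List.mem_pyRange_one] at hc
      have := hall r hr c hc.1 hc.2
      simp [this] at hne
    · simp only [hn, Bool.not_false, decide_eq_true_eq]
      rw [zero_add]
      apply hsum.mpr
      intro r hr c hc1 hc2
      by_contra hne
      apply hn
      simp only [List.any_eq_true]
      exact ⟨c, PySem.List.mem_pyRange_one.mpr ⟨hc1, hc2⟩, r, hr, by simpa using hne⟩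
  · -- x beyond the first row's width: empty column window on both sides
    have hlo : min (max 0 (x - 1)) (w0 : Int) = (w0 : Int) := by omega
    have hhi : min (x + 2) (w0 : Int) = (w0 : Int) := by omega
    have hemp : PySem.List.pyRange (max 0 (x - 1)) (min (x + 2) (w0 : Int)) 1 = [] :=
      PySem.List.pyRange_one_eq_nil (by omega)
    rw [hemp, hlo, hhi, PySem.List.foldl_add rows _ 0]
    simp

lemma enum_findSome? {α β : Type} (xs : List α) (g : Int → Option β) :
    (PySem.List.enumerate xs).findSome? (fun p => g p.1)
      = (PySem.List.pyRange 0 (xs.length : Int) 1).findSome? g := by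
  have h := PySem.List.map_fst_enumerate xs 0
  rw [zero_add] at h
  rw [← h, List.findSome?_map]
  rfl


-- ===== VERDICT (by name: the statement is the Claim_ definition above) =====
theorem first_free_spec : Claim_equal_first_free := by
  intro m orientation _dom hpre
  unfold Spec_first_free first_free first_free_alt
  dsimp only
  congr 1
  apply findSome?_congr
  intro p hp
  rw [enum_findSome? p.2 (fun x =>
    if hasNeighbor m p.1 x then none
    else if orientation = 0 ∧ (p.1 + 1 ≥ (m.length : Int) ∨ hasNeighbor m (p.1 + 1) x) then none
    else if orientation = 1 ∧ (x + 1 ≥ ((m.headD []).length : Int) ∨ hasNeighbor m p.1 (x + 1)) then none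
    else some (p.1, x))]
  apply findSome?_congr
  intro x hx
  have hx0 : 0 ≤ x := (PySem.List.mem_pyRange_one.mp hx).1
  have e1 := freeB_eq_not_hasNeighbor m hpre p.1 x hx0
  have e2 := freeB_eq_not_hasNeighbor m hpre (p.1 + 1) x hx0
  have e3 := freeB_eq_not_hasNeighbor m hpre p.1 (x + 1) (by omega)
  simp only [List.headD_eq_head?_getD] at e1 e2 e3 ⊢
  simp [e1, e2, e3]
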